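-- pv_equiv track=rewrite | github.com/ankidroid/Anki-Android | tools/xml_autoformat.py | trackLineCol
-- ===== SOURCE A (Python) =====
-- def trackLineCol(line, col, newText):
--     for ch in newText:
--         if ch == '\n':
--             line += 1
--             col = 1
--         else:
--             col += 1
--     return line, col
-- ===== SOURCE B (Python) =====
-- def trackLineCol(line, col, newText):
--     # One reverse scan: count newlines and the length of the segment after
--     # the last newline, then combine in closed form.
--     lines = 0
--     tail = 0
--     for ch in reversed(newText):
--         if ch == '\n':
--             lines += 1
--         elif lines == 0:
--             tail += 1
--     if lines == 0:
--         return line, col + tail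
--     return line + lines, 1 + tail
-- ===== Notes on version B (the rewrite author's own statement) =====
-- stated objective: alternative
-- what changed: Replaces A's forward per-character (line,col) state machine with a single reverse scan that counts newlines and the length of the segment after the last newline, combining them in closed form at the end.
import Mathlib
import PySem

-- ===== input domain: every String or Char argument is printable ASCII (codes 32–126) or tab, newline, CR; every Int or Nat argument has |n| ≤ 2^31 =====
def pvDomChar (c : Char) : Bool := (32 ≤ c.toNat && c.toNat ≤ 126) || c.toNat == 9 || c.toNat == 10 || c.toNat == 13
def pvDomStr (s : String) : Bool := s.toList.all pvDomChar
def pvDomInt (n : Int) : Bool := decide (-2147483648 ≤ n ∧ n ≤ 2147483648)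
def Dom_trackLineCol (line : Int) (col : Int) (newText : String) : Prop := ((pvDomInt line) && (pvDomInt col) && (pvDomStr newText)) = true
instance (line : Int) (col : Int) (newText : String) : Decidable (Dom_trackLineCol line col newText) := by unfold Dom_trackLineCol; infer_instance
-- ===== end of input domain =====

-- B replaces A's forward (line,col) state machine by one reverse scan counting newlines
-- and the trailing-segment length, combined in closed form (objective: alternative).

-- ===== PORT A =====
def trackLineCol (line : Int) (col : Int) (newText : String) : Int × Int :=
  newText.toList.foldl
    (fun p ch => if ch = '\n' then (p.1 + 1, (1 : Int)) else (p.1, p.2 + 1))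
    (line, col)

-- ===== PORT B =====
def trackLineCol_alt (line : Int) (col : Int) (newText : String) : Int × Int :=
  let s := newText.toList.reverse.foldl
    (fun p ch =>
      if ch = '\n' then (p.1 + 1, p.2)
      else if p.1 = 0 then (p.1, p.2 + 1) else p)
    ((0 : Int), (0 : Int))
  if s.1 = 0 then (line, col + s.2) else (line + s.1, 1 + s.2)

-- ===== PRECONDITION & SPEC =====
def Spec_trackLineCol (line : Int) (col : Int) (newText : String) (out : Int × Int) : Prop := out = trackLineCol_alt line col newText
instance (line : Int) (col : Int) (newText : String) (out : Int × Int) : Decidable (Spec_trackLineCol line col newText out) := by unfold Spec_trackLineCol; infer_instance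

-- ===== CLAIM (what is proved, stated in full; the proofs are below) =====
def Claim_equal_trackLineCol : Prop := ∀ (line : Int) (col : Int) (newText : String), Dom_trackLineCol line col newText → Spec_trackLineCol line col newText (trackLineCol line col newText)

-- ===== LEMMAS AND PROOFS =====

/-- length of the prefix before the first newline -/
def pvPre : List Char → Int
  | [] => 0
  | ch :: rs => if ch = '\n' then 0 else 1 + pvPre rs

/-- canonical value: newline count and length after the last newline -/
def pvCanon (line col : Int) (cs : List Char) : Int × Int :=
  if '\n' ∈ cs then (line + cs.count '\n', 1 + pvPre cs.reverse)
  else (line, col + cs.length)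

lemma pvPre_append (l : List Char) (a : Char) :
    pvPre (l ++ [a]) = if '\n' ∈ l then pvPre l else l.length + (if a = '\n' then 0 else 1) := by
  induction l with
  | nil => by_cases ha : a = '\n' <;> simp [pvPre, ha]
  | cons ch l ih =>
    by_cases h : ch = '\n'
    · subst h; simp [pvPre]
    · have hm : ('\n' : Char) ∈ ch :: l ↔ '\n' ∈ l := by
        rw [List.mem_cons]
        exact or_iff_right (fun hx => h hx.symm)
      rw [List.cons_append, pvPre, if_neg h, ih, pvPre, if_neg h]
      by_cases hl : '\n' ∈ l
      · rw [if_pos hl, if_pos (hm.mpr hl)]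
      · rw [if_neg hl, if_neg (fun hx => hl (hm.mp hx)), List.length_cons]
        split_ifs <;> push_cast <;> ring

lemma pvPre_of_not_mem (l : List Char) (h : '\n' ∉ l) : pvPre l = l.length := by
  induction l with
  | nil => simp [pvPre]
  | cons ch l ih =>
    simp only [List.mem_cons, not_or] at h
    rw [pvPre, if_neg (fun hc : ch = '\n' => h.1 hc.symm), ih h.2, List.length_cons]
    push_cast; ring

lemma pvCanon_cons_nl (line col : Int) (cs : List Char) :
    pvCanon line col ('\n' :: cs) = pvCanon (line + 1) 1 cs := by
  unfold pvCanon
  rw [List.reverse_cons, pvPre_append]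
  by_cases hc : '\n' ∈ cs
  · have hr : ('\n' : Char) ∈ cs.reverse := List.mem_reverse.mpr hc
    rw [if_pos hc, if_pos List.mem_cons_self, if_pos hr, List.count_cons]
    refine Prod.ext ?_ ?_ <;> simp <;> push_cast <;> ring
  · have hr : ('\n' : Char) ∉ cs.reverse := fun hx => hc (List.mem_reverse.mp hx)
    rw [if_neg hc, if_pos List.mem_cons_self, if_neg hr, List.count_cons,
      List.count_eq_zero.mpr hc]
    refine Prod.ext ?_ ?_ <;> simp

lemma pvCanon_cons (line col : Int) (ch : Char) (cs : List Char) (h : ¬ ch = '\n') :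
    pvCanon line col (ch :: cs) = pvCanon line (col + 1) cs := by
  unfold pvCanon
  rw [List.reverse_cons, pvPre_append]
  have hm : ('\n' : Char) ∈ ch :: cs ↔ '\n' ∈ cs := by
    rw [List.mem_cons]
    exact or_iff_right (fun hx => h hx.symm)
  by_cases hc : '\n' ∈ cs
  · have hr : ('\n' : Char) ∈ cs.reverse := List.mem_reverse.mpr hc
    rw [if_pos hc, if_pos (hm.mpr hc), if_pos hr, List.count_cons]
    refine Prod.ext ?_ ?_ <;> simp [h]
  · have hr : ('\n' : Char) ∉ cs.reverse := fun hx => hc (List.mem_reverse.mp hx)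
    rw [if_neg hc, if_neg (fun hx => hc (hm.mp hx)), List.length_cons]
    refine Prod.ext ?_ ?_ <;> simp <;> push_cast <;> ring

lemma foldA_eq (cs : List Char) : ∀ (line col : Int),
    cs.foldl (fun p ch => if ch = '\n' then (p.1 + 1, (1 : Int)) else (p.1, p.2 + 1)) (line, col)
      = pvCanon line col cs := by
  induction cs with
  | nil => intro line col; simp [pvCanon]
  | cons ch cs ih =>
    intro line col
    by_cases h : ch = '\n'
    · subst h
      rw [List.foldl_cons, if_pos rfl]
      dsimp only
      rw [ih, pvCanon_cons_nl]
    · rw [List.foldl_cons, if_neg h]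
      dsimp only
      rw [ih, pvCanon_cons _ _ _ _ h]

/-- B's reverse fold with a positive newline counter only adds the remaining newline count. -/
lemma foldB_pos (rs : List Char) : ∀ (l t : Int), 0 < l →
    rs.foldl (fun p ch => if ch = '\n' then (p.1 + 1, p.2)
      else if p.1 = 0 then (p.1, p.2 + 1) else p) (l, t)
      = (l + rs.count '\n', t) := by
  induction rs with
  | nil => intro l t _; simp
  | cons ch rs ih =>
    intro l t hl
    by_cases h : ch = '\n'
    · subst h
      rw [List.foldl_cons, if_pos rfl]
      dsimp only
      rw [ih _ _ (by omega), List.count_cons]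
      refine Prod.ext ?_ ?_ <;> simp <;> push_cast <;> ring
    · rw [List.foldl_cons, if_neg h]
      dsimp only
      rw [if_neg (by omega : ¬ l = 0), ih _ _ hl, List.count_cons]
      have hb : (ch == '\n') = false := by simp [h]
      simp [hb]

lemma foldB_zero (rs : List Char) : ∀ (t : Int),
    rs.foldl (fun p ch => if ch = '\n' then (p.1 + 1, p.2)
      else if p.1 = 0 then (p.1, p.2 + 1) else p) (0, t)
      = ((rs.count '\n' : Int), t + pvPre rs) := by
  induction rs with
  | nil => intro t; simp [pvPre]
  | cons ch rs ih =>
    intro t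
    by_cases h : ch = '\n'
    · subst h
      rw [List.foldl_cons, if_pos rfl]
      dsimp only
      rw [show (0 : Int) + 1 = 1 from rfl, foldB_pos rs 1 t (by omega), List.count_cons,
        pvPre, if_pos rfl]
      refine Prod.ext ?_ ?_ <;> simp <;> push_cast <;> ring
    · rw [List.foldl_cons, if_neg h]
      dsimp only
      rw [if_pos rfl, ih, List.count_cons, pvPre, if_neg h]
      have hb : (ch == '\n') = false := by simp [h]
      refine Prod.ext ?_ ?_ <;> simp [hb] <;> ring

lemma altB_eq (line col : Int) (s : String) :
    trackLineCol_alt line col s = pvCanon line col s.toList := by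
  unfold trackLineCol_alt
  rw [foldB_zero]
  simp only [pvCanon, List.count_reverse, zero_add]
  by_cases hc : '\n' ∈ s.toList
  · have h1 : ¬ ((s.toList.count '\n' : Int) = 0) := by
      have := List.count_pos_iff.mpr hc
      omega
    rw [if_pos hc, if_neg h1]
  · have h0 : s.toList.count '\n' = 0 := List.count_eq_zero.mpr hc
    have hr : ('\n' : Char) ∉ s.toList.reverse := fun hx => hc (List.mem_reverse.mp hx)
    rw [if_neg hc, h0, pvPre_of_not_mem _ hr]
    simp

-- ===== VERDICT (by name: the statement is the Claim_ definition above) =====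
theorem trackLineCol_spec : Claim_equal_trackLineCol := by
  intro line col newText _
  unfold Spec_trackLineCol trackLineCol
  rw [altB_eq, foldA_eq]
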